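-- pv_equiv track=rewrite | github.com/MegaDoot/Modules | drymagic/dunderdec.py | out_quotes
-- ===== SOURCE A (Python) =====
-- def out_quotes(string):
--     indexes = [i for i in range(len(string)) if string[i] == '"']
--     inside = []
--     iterate = tuple(range(0, len(indexes), 2))
--     for i in iterate:
--         inside += tuple(range(indexes[i], indexes[i + 1] + 1))
--     outside = [i for i in range(len(string)) if not i in inside]
--     return outside
-- ===== SOURCE B (Python) =====
-- def out_quotes(string):
--     outside = []
--     inside = False
--     for i, ch in enumerate(string):
--         if ch == '"':
--             inside = not inside
--         elif not inside:
--             outside.append(i)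
--     return outside
-- ===== Notes on version B (the rewrite author's own statement) =====
-- stated objective: alternative
-- what changed: Single forward pass toggling an inside-quotes flag per character replaces building the full list of quoted indices and re-scanning it for every position of the string.
-- outside the precondition, e.g. on out_quotes('"'): A raises IndexError, B returns []
import Mathlib
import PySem

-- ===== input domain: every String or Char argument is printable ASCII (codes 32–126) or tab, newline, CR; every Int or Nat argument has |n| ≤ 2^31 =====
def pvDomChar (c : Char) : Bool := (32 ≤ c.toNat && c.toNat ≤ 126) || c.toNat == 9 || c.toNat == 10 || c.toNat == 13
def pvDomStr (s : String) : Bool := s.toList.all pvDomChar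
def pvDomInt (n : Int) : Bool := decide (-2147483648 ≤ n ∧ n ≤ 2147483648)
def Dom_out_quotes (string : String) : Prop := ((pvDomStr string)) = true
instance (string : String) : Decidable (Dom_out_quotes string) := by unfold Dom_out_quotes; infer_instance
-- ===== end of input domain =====

-- B replaces A's "collect every quoted index, then membership-scan the list for each position"
-- with a single forward pass toggling an inside-quotes flag (objective: alternative).

-- ===== PORT A =====
-- pyGetD transcribes Python's `indexes[i]` / `indexes[i + 1]`; the latter would raise
-- IndexError on an odd number of quotes, which Pre_out_quotes excludes.
def out_quotes (string : String) : List Int :=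
  let s := string.toList
  let indexes : List Int :=
    (PySem.List.pyRange 0 (s.length : Int) 1).filter
      (fun i => PySem.List.pyGet? s i == some '"')
  let iterate : List Int := PySem.List.pyRange 0 (indexes.length : Int) 2
  let inside : List Int :=
    iterate.foldl (fun acc i =>
      acc ++ PySem.List.pyRange (PySem.List.pyGetD indexes i 0)
              (PySem.List.pyGetD indexes (i + 1) 0 + 1) 1) []
  (PySem.List.pyRange 0 (s.length : Int) 1).filter (fun i => !(inside.contains i))

-- ===== PORT B =====
def out_quotes_alt (string : String) : List Int :=
  (((PySem.List.enumerate string.toList 0).foldl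
      (fun (st : List Int × Bool) (p : Int × Char) =>
        if p.2 == '"' then (st.1, !st.2)
        else if st.2 then st
        else (st.1 ++ [p.1], st.2)) ([], false))).1

-- ===== PRECONDITION & SPEC =====
-- Pre_ excludes exactly the strings with an odd number of '"', on which A raises IndexError.
def Pre_out_quotes (string : String) : Prop := string.toList.count '"' % 2 = 0
instance (string : String) : Decidable (Pre_out_quotes string) := by unfold Pre_out_quotes; infer_instance
def pvWitness_out_quotes : String := "ab\"cd\"e"

def Spec_out_quotes (string : String) (out : List Int) : Prop := out = out_quotes_alt string
instance (string : String) (out : List Int) : Decidable (Spec_out_quotes string out) := by unfold Spec_out_quotes; infer_instance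

-- ===== CLAIM (what is proved, stated in full; the proofs are below) =====
def Claim_equal_out_quotes : Prop := ∀ (string : String), Dom_out_quotes string → Pre_out_quotes string → Spec_out_quotes string (out_quotes string)

-- ===== LEMMAS AND PROOFS =====

-- keep-predicate of the one-pass scan: index j survives iff its character is not '"' and the
-- inside-flag (initial flag b xor parity of the quote count before j) is off.
def kp (b : Bool) (t : List Char) (j : Nat) : Bool :=
  !(t[j]? == some '"') && (b == decide ((t.take j).count '"' % 2 = 1))

-- reference form of B's scan: a filtered index range
def bref (b : Bool) (t : List Char) (k : Int) : List Int :=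
  ((List.range t.length).filter (kp b t)).map (fun j : Nat => k + Int.ofNat j)

-- the quote positions of s (A's `indexes`), as naturals
def qpos (s : List Char) : List Nat :=
  (List.range s.length).filter (fun j => s[j]? == some '"')

-- "covered by some quote pair", the membership predicate of A's `inside` list
def Covered (qs : List Nat) (j : Nat) : Prop :=
  ∃ k : Nat, 2 * k + 1 < qs.length ∧ qs.getD (2 * k) 0 ≤ j ∧ j ≤ qs.getD (2 * k + 1) 0

lemma kp_zero (b : Bool) (c : Char) (t : List Char) :
    kp b (c :: t) 0 = (!(c == '"') && !b) := by
  simp [kp]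

lemma kp_succ (b : Bool) (c : Char) (t : List Char) (j : Nat) :
    kp b (c :: t) (j + 1) = kp (b ^^ (c == '"')) t j := by
  unfold kp
  rw [show (c :: t).take (j+1) = c :: t.take j from rfl]
  rw [show (c :: t)[j+1]? = t[j]? from rfl]
  congr 1
  by_cases hc : c = '"'
  · have hcnt : (c :: t.take j).count '"' = (t.take j).count '"' + 1 := by
      simp [hc]
    rw [hcnt]
    have hd : decide (((t.take j).count '"' + 1) % 2 = 1) = !decide ((t.take j).count '"' % 2 = 1) := by
      by_cases hp : (t.take j).count '"' % 2 = 1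
      · have : ¬ ((t.take j).count '"' + 1) % 2 = 1 := by omega
        simp [hp, this]
      · have : ((t.take j).count '"' + 1) % 2 = 1 := by omega
        simp [hp, this]
    rw [hd]
    have hcb : (c == '"') = true := by simp [hc]
    rw [hcb]
    cases b <;> simp
  · have hcnt : (c :: t.take j).count '"' = (t.take j).count '"' := by
      simp [hc]
    rw [hcnt]
    have hcb : (c == '"') = false := by simp [hc]
    rw [hcb]
    simp

lemma bref_tail (b : Bool) (c : Char) (t : List Char) (k : Int) :
    List.map (fun j : Nat => k + Int.ofNat j)
        (List.filter (kp b (c :: t)) (List.map Nat.succ (List.range t.length)))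
      = bref (b ^^ (c == '"')) t (k + 1) := by
  rw [List.filter_map, List.map_map]
  rw [show (kp b (c :: t) ∘ Nat.succ) = kp (b ^^ (c == '"')) t from funext fun j => kp_succ b c t j]
  unfold bref
  congr 1
  funext j
  simp [Function.comp, Int.ofNat_eq_natCast, Nat.succ_eq_add_one]
  ring

lemma bref_cons (b : Bool) (c : Char) (t : List Char) (k : Int) :
    bref b (c :: t) k
      = (if (!(c == '"') && !b) then [k] else []) ++ bref (b ^^ (c == '"')) t (k + 1) := by
  unfold bref
  rw [show (c :: t).length = t.length + 1 from rfl, List.range_succ_eq_map]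
  rw [List.filter_cons, kp_zero]
  by_cases h : (!(c == '"') && !b) = true
  · rw [if_pos h, if_pos h, List.map_cons]
    rw [bref_tail]
    unfold bref
    simp
  · rw [if_neg h, if_neg h, List.nil_append]
    rw [bref_tail]
    unfold bref
    rfl

lemma altB_go (t : List Char) (k : Int) (acc : List Int) (b : Bool) :
    ((PySem.List.enumerate t k).foldl
      (fun (st : List Int × Bool) (p : Int × Char) =>
        if p.2 == '"' then (st.1, !st.2)
        else if st.2 then st
        else (st.1 ++ [p.1], st.2)) (acc, b)).1 = acc ++ bref b t k := by
  induction t generalizing k acc b with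
  | nil => simp [bref, PySem.List.enumerate]
  | cons c t ih =>
    rw [PySem.List.enumerate_cons, List.foldl_cons, bref_cons]
    by_cases hc : c = '"'
    · simp only [hc, beq_self_eq_true, if_true]
      rw [ih]
      simp
    · have hcb : (c == '"') = false := by simp [hc]
      simp only [hcb, Bool.false_eq_true, if_false, Bool.xor_false]
      cases b with
      | true =>
        simp only [if_true]
        rw [ih]
        simp
      | false =>
        simp only [Bool.false_eq_true, if_false]
        rw [ih]
        simp [List.append_assoc]

lemma qpos_pairwise (s : List Char) : (qpos s).Pairwise (· < ·) :=
  List.pairwise_lt_range.filter _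

lemma mem_qpos (s : List Char) (x : Nat) :
    x ∈ qpos s ↔ x < s.length ∧ s[x]? = some '"' := by
  simp [qpos, List.mem_filter, List.mem_range]

-- in a strictly increasing list, the j-th element is below i exactly when j is below the
-- number of elements below i
lemma prefix_count (qs : List Nat) (hs : qs.Pairwise (· < ·)) (i : Nat) :
    ∀ j, j < qs.length → (qs.getD j 0 < i ↔ j < qs.countP (fun x => decide (x < i))) := by
  induction qs with
  | nil => intro j hj; simp at hj
  | cons a t ih =>
    intro j hj
    rw [List.pairwise_cons] at hs
    have hcp : (a :: t).countP (fun x => decide (x < i))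
        = t.countP (fun x => decide (x < i)) + if a < i then 1 else 0 := by
      rw [List.countP_cons]; simp
    by_cases ha : a < i
    · cases j with
      | zero =>
        rw [show (a :: t).getD 0 0 = a from rfl, hcp]
        simp [ha]
      | succ j =>
        have hj' : j < t.length := by simpa using hj
        rw [show (a :: t).getD (j+1) 0 = t.getD j 0 from rfl, hcp]
        rw [ih hs.2 j hj']
        simp [ha]
    · have hz : t.countP (fun x => decide (x < i)) = 0 := by
        rw [List.countP_eq_zero]
        intro x hx
        have := hs.1 x hx
        simp only [decide_eq_true_eq]
        omega
      cases j with
      | zero =>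
        rw [show (a :: t).getD 0 0 = a from rfl, hcp, hz]
        simp [ha]
      | succ j =>
        have hj' : j < t.length := by simpa using hj
        rw [show (a :: t).getD (j+1) 0 = t.getD j 0 from rfl, hcp, hz]
        have hmem : t.getD j 0 ∈ t := by
          rw [List.getD_eq_getElem?_getD, List.getElem?_eq_getElem hj']
          exact List.getElem_mem hj'
        have := hs.1 _ hmem
        rw [List.getD_eq_getElem?_getD] at this
        simp [ha]
        omega

lemma filter_range_restrict (p : Nat → Bool) (j n : Nat) (h : j ≤ n) :
    (List.range n).filter (fun x => decide (x < j) && p x) = (List.range j).filter p := by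
  induction n, h using Nat.le_induction with
  | base =>
    apply List.filter_congr
    intro x hx
    simp only [List.mem_range] at hx
    simp [hx]
  | succ n hjn ih =>
    rw [List.range_succ, List.filter_append, ih]
    have : ¬ (n < j) := by omega
    simp [this]

lemma count_take_eq (s : List Char) (j : Nat) (hj : j ≤ s.length) :
    (s.take j).count '"' = (qpos s).countP (fun x => decide (x < j)) := by
  have h1 : (qpos s).countP (fun x => decide (x < j))
      = ((List.range j).filter (fun x => s[x]? == some '"')).length := by
    rw [List.countP_eq_length_filter, qpos, List.filter_filter,
        filter_range_restrict _ j s.length hj]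
  rw [h1]
  clear h1
  induction j with
  | zero => simp
  | succ j ih =>
    have hj' : j ≤ s.length := by omega
    have hlt : j < s.length := by omega
    rw [List.take_add_one, List.range_succ, List.filter_append, List.count_append, ih hj']
    by_cases hc : s[j] = '"'
    · simp [List.getElem?_eq_getElem hlt, hc]
    · simp [List.getElem?_eq_getElem hlt, hc]

-- the heart of the equivalence: with an even number of quotes, position j lies under some
-- quote pair exactly when it is a quote itself or an odd number of quotes precedes it
lemma covered_iff (s : List Char) (heven : (qpos s).length % 2 = 0) (j : Nat) (hj : j < s.length) :
    Covered (qpos s) j ↔ (s[j]? = some '"' ∨ (s.take j).count '"' % 2 = 1) := by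
  set qs := qpos s with hqs
  have hsor := qpos_pairwise s
  set m := qs.countP (fun x => decide (x < j)) with hm
  have hpc := prefix_count qs hsor j
  have hcnt : (s.take j).count '"' = m := count_take_eq s j (le_of_lt hj)
  have hmono : ∀ p q (hq : q < qs.length), p < q → qs.getD p 0 < qs.getD q 0 := by
    intro p q hq hpq
    have hp : p < qs.length := lt_trans hpq hq
    rw [List.getD_eq_getElem?_getD, List.getD_eq_getElem?_getD,
        List.getElem?_eq_getElem hp, List.getElem?_eq_getElem hq]
    exact List.pairwise_iff_getElem.mp hsor p q hp hq hpq
  have hgetmem : ∀ p, p < qs.length → qs.getD p 0 ∈ qs := by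
    intro p hp
    rw [List.getD_eq_getElem?_getD, List.getElem?_eq_getElem hp]
    exact List.getElem_mem hp
  constructor
  · rintro ⟨k, hk, h1, h2⟩
    by_cases hP : s[j]? = some '"'
    · exact Or.inl hP
    · right
      rw [hcnt]
      have hne1 : qs.getD (2*k) 0 ≠ j := by
        intro he
        have := (mem_qpos s _).mp (hgetmem (2*k) (by omega))
        rw [he] at this
        exact hP this.2
      have hne2 : qs.getD (2*k+1) 0 ≠ j := by
        intro he
        have := (mem_qpos s _).mp (hgetmem (2*k+1) hk)
        rw [he] at this
        exact hP this.2
      have hlt1 : qs.getD (2*k) 0 < j := by omega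
      have hlt2 : ¬ (qs.getD (2*k+1) 0 < j) := by omega
      have ha : 2*k < m := (hpc (2*k) (by omega)).mp hlt1
      have hb : ¬ (2*k+1 < m) := fun hh => hlt2 ((hpc (2*k+1) hk).mpr hh)
      omega
  · intro h
    have hmlen : m ≤ qs.length := List.countP_le_length
    rcases h with hP | hodd
    · -- j is itself a quote: it is the m-th element of qs
      have hjm : j ∈ qs := (mem_qpos s j).mpr ⟨hj, hP⟩
      obtain ⟨idx, hidx, hidxe⟩ := List.getElem_of_mem hjm
      have hgidx : qs.getD idx 0 = j := by
        rw [List.getD_eq_getElem?_getD, List.getElem?_eq_getElem hidx, hidxe]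
        rfl
      have hmle : m ≤ idx := by
        by_contra hh
        have h3 : qs.getD idx 0 < j := (hpc idx hidx).mpr (by omega)
        omega
      have hmeq : m = idx := by
        by_contra hh
        have hlt : m < idx := by omega
        have := hmono m idx hidx hlt
        have h2 := (hpc m (by omega)).mp (by omega)
        omega
      have hqm : qs.getD m 0 = j := by rw [hmeq]; exact hgidx
      have hmlt : m < qs.length := by omega
      rcases Nat.even_or_odd m with he | ho
      · obtain ⟨k, hk⟩ := he
        have hlen : 2*k+1 < qs.length := by omega
        refine ⟨k, hlen, by rw [show 2*k = m by omega, hqm], ?_⟩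
        have hnl : ¬ (qs.getD (2*k+1) 0 < j) := by
          intro hh
          have := (hpc (2*k+1) hlen).mp hh
          omega
        omega
      · obtain ⟨k, hk⟩ := ho
        refine ⟨k, by omega, ?_, by rw [show 2*k+1 = m by omega, hqm]⟩
        have : qs.getD (2*k) 0 < j := (hpc (2*k) (by omega)).mpr (by omega)
        omega
    · rw [hcnt] at hodd
      obtain ⟨k, hk⟩ : ∃ k, m = 2*k+1 := ⟨m/2, by omega⟩
      have hmlt : m < qs.length := by omega
      refine ⟨k, by omega, ?_, ?_⟩
      · have : qs.getD (2*k) 0 < j := (hpc (2*k) (by omega)).mpr (by omega)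
        omega
      · have : ¬ (qs.getD (2*k+1) 0 < j) := by
          intro hh
          have := (hpc (2*k+1) (by omega)).mp hh
          omega
        omega

lemma count_eq_len_qpos (s : List Char) : s.count '"' = (qpos s).length := by
  have h := count_take_eq s s.length le_rfl
  rw [List.take_length] at h
  rw [h]
  exact List.countP_eq_length.mpr (fun x hx => by
    have := (List.mem_filter.mp hx).1
    simp only [List.mem_range] at this
    simpa using this)

lemma getD_map_natCast (qs : List Nat) (m : Nat) :
    PySem.List.pyGetD (qs.map (fun j : Nat => (j : Int))) (m : Int) 0 = ((qs.getD m 0 : Nat) : Int) := by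
  rw [PySem.List.pyGetD_natCast, List.getD_eq_getElem?_getD, List.getD_eq_getElem?_getD,
      List.getElem?_map]
  cases qs[m]? <;> rfl

set_option maxHeartbeats 1000000 in
lemma A_eq_bref (string : String) (h : Pre_out_quotes string) :
    out_quotes string = bref false string.toList 0 := by
  simp only [out_quotes]
  set s := string.toList with hs
  set qs := qpos s with hqs
  have heven : qs.length % 2 = 0 := by
    rw [← count_eq_len_qpos]; exact h
  have hrange : PySem.List.pyRange 0 ((s.length : Int)) 1
      = (List.range s.length).map (fun j : Nat => (j : Int)) := by
    rw [PySem.List.pyRange_one]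
    simp
  have hidx : (PySem.List.pyRange 0 ((s.length : Int)) 1).filter
        (fun i => PySem.List.pyGet? s i == some '"')
      = qs.map (fun j : Nat => (j : Int)) := by
    rw [hrange, List.filter_map, hqs]
    unfold qpos
    congr 1
    apply List.filter_congr
    intro x _
    simp [Function.comp, PySem.List.pyGet?_natCast]
  rw [hidx]
  rw [PySem.List.foldl_append_eq_flatMap, List.nil_append]
  set inform : List Int := (PySem.List.pyRange 0 (((qs.map (fun j : Nat => (j : Int))).length : Int)) 2).flatMap
      (fun i => PySem.List.pyRange (PySem.List.pyGetD (qs.map (fun j : Nat => (j : Int))) i 0)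
        (PySem.List.pyGetD (qs.map (fun j : Nat => (j : Int))) (i + 1) 0 + 1) 1) with hinform
  have hmemins : ∀ j : Nat, ((j : Int) ∈ inform) ↔ Covered qs j := by
    intro j
    rw [hinform, List.mem_flatMap]
    constructor
    · rintro ⟨i, hi, hmem⟩
      rw [PySem.List.mem_pyRange_iff_of_pos (by norm_num)] at hi
      obtain ⟨h0, hL, hdvd⟩ := hi
      simp only [List.length_map] at hL
      obtain ⟨k, hk⟩ : ∃ k : Nat, i = ((2 * k : Nat) : Int) := ⟨i.toNat / 2, by omega⟩
      subst hk
      rw [getD_map_natCast, show ((( 2 * k : Nat) : Int) + 1) = (((2 * k + 1 : Nat)) : Int) by push_cast; ring,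
          getD_map_natCast, PySem.List.mem_pyRange_one] at hmem
      have hkL : 2 * k < qs.length := by exact_mod_cast hL
      refine ⟨k, by omega, ?_, ?_⟩
      · have := hmem.1; omega
      · have := hmem.2; omega
    · rintro ⟨k, hk, h1, h2⟩
      refine ⟨((2 * k : Nat) : Int), ?_, ?_⟩
      · rw [PySem.List.mem_pyRange_iff_of_pos (by norm_num)]
        simp only [List.length_map]
        refine ⟨by positivity, by exact_mod_cast (by omega : 2 * k < qs.length), by omega⟩
      · rw [getD_map_natCast, show ((( 2 * k : Nat) : Int) + 1) = (((2 * k + 1 : Nat)) : Int) by push_cast; ring,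
            getD_map_natCast, PySem.List.mem_pyRange_one]
        constructor <;> [exact_mod_cast h1; omega]
  rw [hrange, List.filter_map]
  unfold bref
  rw [show (fun j : Nat => (0 : Int) + Int.ofNat j) = (fun j : Nat => (j : Int)) from funext fun j => by simp]
  congr 1
  apply List.filter_congr
  intro x hx
  have hx' : x < s.length := List.mem_range.mp hx
  have hcov := (hmemins x).trans (covered_iff s heven x hx')
  by_cases hc : (x : Int) ∈ inform
  · rcases hcov.mp hc with hP | hodd
    · simp [Function.comp, kp, hP]
      exact hc
    · simp [Function.comp, kp, hodd]
      exact hc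
  · have hno := hcov.not.mp hc
    rw [not_or] at hno
    obtain ⟨hP, hodd⟩ := hno
    simp [Function.comp, kp, hodd, hc, hP]

-- ===== VERDICT (by name: the statement is the Claim_ definition above) =====
theorem out_quotes_spec : Claim_equal_out_quotes := by
  intro string _ hpre
  unfold Spec_out_quotes
  rw [A_eq_bref string hpre]
  unfold out_quotes_alt
  rw [altB_go]
  simp
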